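-- pv_equiv track=rewrite | github.com/kio7/UiT_code_examples | VP/Oblig_4/Evaluate_expression.py | insert_blanks
-- ===== SOURCE A (Python) =====
-- def insert_blanks(s):
--     result = ""
--
--     for ch in s:
--         if ch == '(' or ch == ')' or ch == '+' or ch == '-' or \
--            ch == '*' or ch == '/' or ch == '%' or ch == '^':
--             result += " " + ch + " "
--         else:
--             result += ch
--
--     return result
-- ===== SOURCE B (Python) =====
-- def insert_blanks(s):
--     # Staged whole-string passes: one replace per operator character.
--     # Correct because each replacement inserts only spaces (never an operator),
--     # and the eight operators are distinct, so passes do not interfere.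
--     for c in '()+-*/%^':
--         s = s.replace(c, ' ' + c + ' ')
--     return s
-- ===== Notes on version B (the rewrite author's own statement) =====
-- stated objective: faster
-- what changed: Replaces A's single character-by-character pass with if/else chain and string += accumulation by eight staged whole-string passes, one C-level str.replace per operator character; passes cannot interfere since replacements insert only spaces.
import Mathlib
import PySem

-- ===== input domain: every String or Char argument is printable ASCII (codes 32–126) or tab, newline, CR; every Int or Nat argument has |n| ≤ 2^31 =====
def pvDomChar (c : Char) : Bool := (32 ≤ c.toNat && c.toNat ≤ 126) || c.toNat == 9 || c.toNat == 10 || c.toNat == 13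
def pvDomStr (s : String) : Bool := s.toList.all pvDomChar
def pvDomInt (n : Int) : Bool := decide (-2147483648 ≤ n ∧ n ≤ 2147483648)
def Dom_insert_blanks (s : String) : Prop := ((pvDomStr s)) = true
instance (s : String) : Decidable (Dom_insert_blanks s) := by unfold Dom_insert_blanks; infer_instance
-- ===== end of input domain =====

-- B replaces A's single character-by-character pass (if/else chain, string += accumulation)
-- by eight staged whole-string passes, one str.replace per operator character.
-- ===== PORT A =====
-- A: explicit loop over the characters, result accumulated by string concatenation.
def insert_blanks (s : String) : String :=
  String.ofList (s.toList.foldl (fun result ch =>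
    if ch == '(' || ch == ')' || ch == '+' || ch == '-' ||
       ch == '*' || ch == '/' || ch == '%' || ch == '^' then
      result ++ ([' '] ++ [ch] ++ [' '])
    else
      result ++ [ch]) [])

-- ===== PORT B =====
-- B: for c in '()+-*/%^': s = s.replace(c, ' ' + c + ' '); return s
-- (PySem.Chars.replace is str.replace; the loop is a foldl over the operator characters)
def insert_blanks_alt (s : String) : String :=
  String.ofList (("()+-*/%^".toList).foldl
    (fun cur c => PySem.Chars.replace cur [c] [' ', c, ' ']) s.toList)

-- ===== PRECONDITION & SPEC =====
def Spec_insert_blanks (s : String) (out : String) : Prop := out = insert_blanks_alt s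
instance (s : String) (out : String) : Decidable (Spec_insert_blanks s out) := by unfold Spec_insert_blanks; infer_instance

-- ===== CLAIM (what is proved, stated in full; the proofs are below) =====
def Claim_equal_insert_blanks : Prop := ∀ (s : String), Dom_insert_blanks s → Spec_insert_blanks s (insert_blanks s)

-- ===== LEMMAS AND PROOFS =====

-- str.replace with a one-character pattern is a flatMap over the characters
theorem pv_go_single (c : Char) (new : List Char) :
    ∀ (fuel : Nat) (l acc : List Char), l.length ≤ fuel →
      PySem.Chars.replace.go [c] new fuel l acc
        = acc.reverse ++ l.flatMap (fun ch => if ch == c then new else [ch]) := by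
  intro fuel
  induction fuel with
  | zero =>
    intro l acc h
    have : l = [] := List.eq_nil_of_length_eq_zero (Nat.le_zero.mp h)
    subst this
    simp [PySem.Chars.replace.go]
  | succ n ih =>
    intro l acc h
    cases l with
    | nil => simp [PySem.Chars.replace.go]
    | cons ch t =>
      rw [PySem.Chars.replace.go]
      by_cases hc : ch = c
      · subst hc
        have hpre : [ch].isPrefixOf (ch :: t) = true := by simp [List.isPrefixOf]
        rw [if_pos hpre]
        simp only [List.length_cons] at h
        rw [ih _ _ (by simpa using Nat.lt_succ_iff.mp (Nat.lt_of_lt_of_le (Nat.lt_succ_self _) h))]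
        simp
      · have hpre : [c].isPrefixOf (ch :: t) = false := by
          simp [List.isPrefixOf, beq_eq_false_iff_ne.mpr (fun he => hc he.symm)]
        rw [if_neg (by simp [hpre])]
        simp only [List.length_cons] at h
        rw [ih _ _ (Nat.le_of_succ_le_succ h)]
        simp [hc]

theorem pv_replace_single (c : Char) (new : List Char) (l : List Char) :
    PySem.Chars.replace l [c] new
      = l.flatMap (fun ch => if ch == c then new else [ch]) := by
  rw [PySem.Chars.replace]
  rw [if_neg (by simp)]
  exact pv_go_single c new l.length l [] (le_refl _)

-- B's fold of replace-passes, rewritten as a fold of flatMaps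
def pvPass (c : Char) (l : List Char) : List Char :=
  l.flatMap (fun ch => if ch == c then [' ', c, ' '] else [ch])

theorem pv_alt_eq (l : List Char) :
    ("()+-*/%^".toList).foldl (fun cur c => PySem.Chars.replace cur [c] [' ', c, ' ']) l
      = ("()+-*/%^".toList).foldl (fun cur c => pvPass c cur) l := by
  induction ("()+-*/%^".toList) generalizing l with
  | nil => rfl
  | cons c t ih =>
    simp only [List.foldl_cons]
    rw [pv_replace_single c _ l]
    exact ih _

-- each staged fold distributes over append, so it is determined by single characters
theorem pv_stage_append (ops : List Char) :
    ∀ (a b : List Char),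
      ops.foldl (fun cur c => pvPass c cur) (a ++ b)
        = ops.foldl (fun cur c => pvPass c cur) a ++ ops.foldl (fun cur c => pvPass c cur) b := by
  induction ops with
  | nil => intro a b; simp
  | cons c t ih =>
    intro a b
    simp only [List.foldl_cons]
    rw [show pvPass c (a ++ b) = pvPass c a ++ pvPass c b by simp [pvPass]]
    exact ih _ _

theorem pv_stage_flatMap (ops : List Char) (l : List Char) :
    ops.foldl (fun cur c => pvPass c cur) l
      = l.flatMap (fun ch => ops.foldl (fun cur c => pvPass c cur) [ch]) := by
  induction l with
  | nil =>
    induction ops with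
    | nil => simp
    | cons c t ih => simpa [pvPass] using ih
  | cons ch t ih =>
    rw [show (ch :: t) = [ch] ++ t from rfl, pv_stage_append, ih]
    simp

-- per character: the eight staged passes on a single character compute A's if/else chain
theorem pv_single_char (ch : Char) :
    ("()+-*/%^".toList).foldl (fun cur c => pvPass c cur) [ch]
      = (if ch == '(' || ch == ')' || ch == '+' || ch == '-' ||
            ch == '*' || ch == '/' || ch == '%' || ch == '^' then
           ([' '] ++ [ch] ++ [' '])
         else [ch]) := by
  by_cases h1 : ch = '(' ; · subst h1; decide
  by_cases h2 : ch = ')' ; · subst h2; decide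
  by_cases h3 : ch = '+' ; · subst h3; decide
  by_cases h4 : ch = '-' ; · subst h4; decide
  by_cases h5 : ch = '*' ; · subst h5; decide
  by_cases h6 : ch = '/' ; · subst h6; decide
  by_cases h7 : ch = '%' ; · subst h7; decide
  by_cases h8 : ch = '^' ; · subst h8; decide
  simp [pvPass, h1, h2, h3, h4, h5, h6, h7, h8]

-- A's loop, characterised as a flatMap
theorem pv_fold_eq (l : List Char) (acc : List Char) :
    l.foldl (fun result ch =>
      if ch == '(' || ch == ')' || ch == '+' || ch == '-' ||
         ch == '*' || ch == '/' || ch == '%' || ch == '^' then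
        result ++ ([' '] ++ [ch] ++ [' '])
      else result ++ [ch]) acc
      = acc ++ l.flatMap (fun ch =>
          if ch == '(' || ch == ')' || ch == '+' || ch == '-' ||
             ch == '*' || ch == '/' || ch == '%' || ch == '^' then
            ([' '] ++ [ch] ++ [' '])
          else [ch]) := by
  induction l generalizing acc with
  | nil => simp
  | cons ch t ih =>
    simp only [List.foldl_cons, List.flatMap_cons]
    rw [ih]
    by_cases h : (ch == '(' || ch == ')' || ch == '+' || ch == '-' ||
        ch == '*' || ch == '/' || ch == '%' || ch == '^') = true
    · rw [if_pos h, if_pos h]; simp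
    · rw [if_neg h, if_neg h]; simp

-- ===== VERDICT (by name: the statement is the Claim_ definition above) =====
theorem insert_blanks_spec : Claim_equal_insert_blanks := by
  intro s _
  unfold Spec_insert_blanks insert_blanks insert_blanks_alt
  rw [pv_fold_eq, pv_alt_eq, pv_stage_flatMap]
  simp only [pv_single_char]
  simp
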